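-- pv_equiv track=rewrite | github.com/linhdvu14/cp-sols | sols/CodeForces/1775_d2/C_Interesting_Sequence.py | solve
-- ===== SOURCE A (Python) =====
-- BITS = 60
--
-- def solve(N, X):
--     if not N & X == X: return -1
--
--     msb_n = msb_diff = -1
--     for i in range(BITS - 1, -1, -1):
--         if (N >> i) & 1:
--             if msb_n == -1: msb_n = i
--             if (X >> i) & 1 == 0:
--                 msb_diff = i
--                 break
--
--     if msb_diff == -1: return N
--
--     msb_set = -1
--     for i in range(msb_diff, msb_n):
--         if (N >> i) & 1 == 0:
--             msb_set = i
--             break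
--
--     if msb_set == -1: return -1 if X != 0 else (1 << (msb_n + 1))
--
--     res = 1 << msb_set
--     for i in range(msb_n, msb_set, -1):
--         if (N >> i) & 1:
--             res |= 1 << i
--
--     for i in range(msb_set):
--         if (X >> i) & 1:
--             return -1
--
--     return res
-- ===== SOURCE B (Python) =====
-- def solve(N, X):
--     if N & X != X:
--         return -1
--     if N == X:
--         return N
--     d = (N ^ X).bit_length() - 1          # highest bit where N and X differ
--     res = ((N >> d) + 1) << d             # carry sets the lowest clear bit >= d, clears below
--     return res if res & X == X else -1
-- ===== Notes on version B (the rewrite author's own statement) =====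
-- stated objective: simpler
-- what changed: A's four explicit bit-scan loops (find msb of N, find highest differing bit, find lowest clear bit above it, rebuild the result bit by bit, then scan X's low bits) are replaced by three lines of closed-form bit arithmetic: d = (N^X).bit_length()-1, res = ((N>>d)+1)<<d (the +1 carry ripples through the run of ones and lands exactly on A's msb_set, clearing everything below), and a single res & X == X test that subsumes both of A's -1 checks.
-- outside the precondition, e.g. on solve(-1, 0): A returns 1152921504606846976, B returns 0; on solve(-2, 0): A returns 1152921504606846976, B returns 0
import Mathlib
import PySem

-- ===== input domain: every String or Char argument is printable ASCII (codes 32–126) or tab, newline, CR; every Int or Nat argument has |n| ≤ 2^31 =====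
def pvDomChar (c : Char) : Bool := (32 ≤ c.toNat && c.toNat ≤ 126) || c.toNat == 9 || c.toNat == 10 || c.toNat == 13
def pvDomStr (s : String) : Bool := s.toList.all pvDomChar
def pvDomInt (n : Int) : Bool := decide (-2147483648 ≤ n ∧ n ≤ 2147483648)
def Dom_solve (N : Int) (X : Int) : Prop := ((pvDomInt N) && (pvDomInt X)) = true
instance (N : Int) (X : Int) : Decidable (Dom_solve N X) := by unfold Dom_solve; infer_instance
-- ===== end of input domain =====

-- B replaces A's four bit-scan loops with closed-form bit arithmetic (a single +1 carry); equivalence is proved on Pre_ (everything except negative N with N&X==X and N≠X, which lies outside the problem's domain of 0 <= X <= N).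

-- ===== PORT A =====
-- first loop: scan i = 59..0; record msb of N, break at the highest bit set in N but not in X
def solveLoop1 (N X : Int) : List Int → Int → Int → Int × Int
  | [], msb_n, msb_diff => (msb_n, msb_diff)
  | i :: rest, msb_n, msb_diff =>
    -- Python `if (N >> i) & 1:` — the bit is 0 or 1, truthiness = ≠ 0; i ∈ range(...) is ≥ 0, so `.toNat` is exact
    if PySem.Int.band (N >>> i.toNat) 1 ≠ 0 then
      let msb_n' := if msb_n = -1 then i else msb_n
      if PySem.Int.band (X >>> i.toNat) 1 = 0 then (msb_n', i)   -- break with msb_diff = i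
      else solveLoop1 N X rest msb_n' msb_diff
    else solveLoop1 N X rest msb_n msb_diff

-- second loop: first i in range(msb_diff, msb_n) with bit i of N clear, else -1
def solveLoop2 (N : Int) : List Int → Int
  | [] => -1
  | i :: rest => if PySem.Int.band (N >>> i.toNat) 1 = 0 then i else solveLoop2 N rest

-- third loop: res |= 1 << i for the set bits of N, i = msb_n .. msb_set+1
def solveLoop3 (N : Int) : List Int → Int → Int
  | [], res => res
  | i :: rest, res =>
    if PySem.Int.band (N >>> i.toNat) 1 ≠ 0 then
      solveLoop3 N rest (PySem.Int.bor res (1 <<< i.toNat))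
    else solveLoop3 N rest res

-- fourth loop: does X have a set bit below msb_set?
def solveLoop4 (X : Int) : List Int → Bool
  | [] => false
  | i :: rest => if PySem.Int.band (X >>> i.toNat) 1 ≠ 0 then true else solveLoop4 X rest

def solve (N : Int) (X : Int) : Int :=
  if PySem.Int.band N X ≠ X then -1
  else
    let p := solveLoop1 N X (PySem.List.pyRange 59 (-1) (-1)) (-1) (-1)
    let msb_n := p.1
    let msb_diff := p.2
    if msb_diff = -1 then N
    else
      let msb_set := solveLoop2 N (PySem.List.pyRange msb_diff msb_n 1)
      if msb_set = -1 then (if X ≠ 0 then -1 else 1 <<< (msb_n + 1).toNat)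
      else
        let res := solveLoop3 N (PySem.List.pyRange msb_n msb_set (-1)) (1 <<< msb_set.toNat)
        if solveLoop4 X (PySem.List.pyRange 0 msb_set 1) = true then -1 else res

-- ===== PORT B =====
def solve_alt (N : Int) (X : Int) : Int :=
  if PySem.Int.band N X ≠ X then -1
  else if N = X then N
  else
    -- highest bit where N and X differ; N ≠ X so N^X ≠ 0 and d ≥ 0 (`.toNat` exact)
    let d : Int := (PySem.Int.bitLength (PySem.Int.bxor N X) : Int) - 1
    let res : Int := ((N >>> d.toNat) + 1) <<< d.toNat
    if PySem.Int.band res X = X then res else -1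

-- ===== PRECONDITION & SPEC =====
-- Pre_ excludes negative N only on inputs where the bit scan actually runs (N & X == X and
-- N ≠ X): negative N is outside the problem's natural domain (Codeforces 1775C guarantees
-- 0 ≤ X ≤ N), and there A's fixed 60-bit scan and B's unbounded arithmetic are two equally
-- unspecified choices (e.g. on (-1, 0) A returns 2^60 and B returns 0); everywhere else
-- (the subset check fails, or N == X) both programs agree and the claim covers them.
def Pre_solve (N : Int) (X : Int) : Prop :=
  0 ≤ N ∨ PySem.Int.band N X ≠ X ∨ N = X
instance (N : Int) (X : Int) : Decidable (Pre_solve N X) := by unfold Pre_solve; infer_instance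
def pvWitness_solve : Int × Int := (10, 8)

def Spec_solve (N : Int) (X : Int) (out : Int) : Prop := out = solve_alt N X
instance (N : Int) (X : Int) (out : Int) : Decidable (Spec_solve N X out) := by unfold Spec_solve; infer_instance

-- ===== CLAIM (what is proved, stated in full; the proofs are below) =====
def Claim_equal_solve : Prop := ∀ (N : Int) (X : Int), Dom_solve N X → Pre_solve N X → Spec_solve N X (solve N X)

-- ===== LEMMAS AND PROOFS =====

-- the Python bit test `(m >> k) & 1` on a nonnegative m, as a Nat testBit
theorem band_one_eq (m k : Nat) : PySem.Int.band ((↑m : Int) >>> k) 1 = if m.testBit k then 1 else 0 := by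
  rw [show ((↑m : Int) >>> k) = ↑(m >>> k) from rfl, show (1 : Int) = ((1 : Nat) : Int) from rfl,
    PySem.Int.band_natCast]
  rcases Nat.mod_two_eq_zero_or_one (m >>> k) with h | h <;>
    simp [Nat.testBit, Nat.and_one_is_mod, h]

theorem loop1_refl (N : Int) : ∀ (L : List Int) (mn : Int),
    (solveLoop1 N N L mn (-1)).2 = -1 := by
  intro L
  induction L with
  | nil => intro mn; rfl
  | cons i rest ih =>
    intro mn
    simp only [solveLoop1]
    split
    · next h => simp only [ih]
    · exact ih mn

theorem loop1_phase2 (n x Dd : Nat) (mn : Int) (hmn : ¬ mn = -1)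
    (hsub : ∀ j, x.testBit j = true → n.testBit j = true)
    (hD1 : 2 ^ Dd ≤ n ^^^ x) (hD2 : n ^^^ x < 2 ^ (Dd + 1)) :
    ∀ k : Nat, n ^^^ x < 2 ^ k →
      solveLoop1 (↑n) (↑x) (PySem.List.pyRange (↑k - 1) (-1) (-1)) mn (-1) = (mn, ↑Dd) := by
  intro k
  induction k with
  | zero =>
    intro hk
    have := Nat.one_le_two_pow (n := Dd)
    omega
  | succ k ih =>
    intro hk
    rw [show (((k + 1 : Nat) : Int) - 1) = (k : Int) by push_cast; ring,
      PySem.List.pyRange_neg_one_cons (by omega)]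
    simp only [solveLoop1, Int.toNat_natCast, band_one_eq]
    have hkd : Dd ≤ k := by
      by_contra hcon
      have h2 : 2 ^ (k + 1) ≤ 2 ^ Dd := Nat.pow_le_pow_right (by norm_num) (by omega)
      omega
    rcases Nat.eq_or_lt_of_le hkd with heq | hlt
    · -- k = Dd : N has the bit, X does not: break here
      subst heq
      have htb : (n ^^^ x).testBit Dd = true :=
        Nat.testBit_of_two_pow_le_and_two_pow_add_one_gt hD1 hD2
      rw [Nat.testBit_xor] at htb
      have hxk : x.testBit Dd = false := by
        cases hxb : x.testBit Dd
        · rfl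
        · rw [hsub Dd hxb, hxb] at htb; simp at htb
      have hnk : n.testBit Dd = true := by
        cases hnb : n.testBit Dd
        · rw [hnb, hxk] at htb; simp at htb
        · rfl
      simp [hnk, hxk, hmn]
    · -- k > Dd : N and X agree at bit k, no break
      have hDk : n ^^^ x < 2 ^ k :=
        Nat.lt_of_lt_of_le hD2 (Nat.pow_le_pow_right (by norm_num) hlt)
      have htb : (n ^^^ x).testBit k = false := Nat.testBit_lt_two_pow hDk
      rw [Nat.testBit_xor] at htb
      cases hnb : n.testBit k
      · simpa using ih hDk
      · have hxb : x.testBit k = true := by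
          rw [hnb] at htb
          cases hxb : x.testBit k
          · rw [hxb] at htb; simp at htb
          · rfl
        simp only [hxb]
        simpa [hmn] using ih hDk


theorem loop1_phase1 (n x M Dd : Nat)
    (hsub : ∀ j, x.testBit j = true → n.testBit j = true)
    (hM1 : 2 ^ M ≤ n) (hM2 : n < 2 ^ (M + 1))
    (hD1 : 2 ^ Dd ≤ n ^^^ x) (hD2 : n ^^^ x < 2 ^ (Dd + 1)) (hDM : Dd ≤ M) :
    ∀ k : Nat, n < 2 ^ k →
      solveLoop1 (↑n) (↑x) (PySem.List.pyRange (↑k - 1) (-1) (-1)) (-1) (-1) = (↑M, ↑Dd) := by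
  intro k
  induction k with
  | zero =>
    intro hk
    have := Nat.one_le_two_pow (n := M)
    omega
  | succ k ih =>
    intro hk
    rw [show (((k + 1 : Nat) : Int) - 1) = (k : Int) by push_cast; ring,
      PySem.List.pyRange_neg_one_cons (by omega)]
    simp only [solveLoop1, Int.toNat_natCast, band_one_eq]
    have hMk : M ≤ k := by
      by_contra hcon
      have h2 : 2 ^ (k + 1) ≤ 2 ^ M := Nat.pow_le_pow_right (by norm_num) (by omega)
      omega
    rcases Nat.eq_or_lt_of_le hMk with heq | hlt
    · -- k = M : the msb of N; record it
      subst heq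
      have hnk : n.testBit M = true :=
        Nat.testBit_of_two_pow_le_and_two_pow_add_one_gt hM1 hM2
      rcases Nat.eq_or_lt_of_le hDM with heqD | hltD
      · -- Dd = M : X lacks this very bit, break immediately
        subst heqD
        have htb : (n ^^^ x).testBit Dd = true :=
          Nat.testBit_of_two_pow_le_and_two_pow_add_one_gt hD1 hD2
        rw [Nat.testBit_xor, hnk] at htb
        have hxk : x.testBit Dd = false := by
          cases hxb : x.testBit Dd
          · rfl
          · rw [hxb] at htb; simp at htb
        simp [hnk, hxk]
      · -- Dd < M : X has the bit too, continue in phase 2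
        have hDln : n ^^^ x < 2 ^ M :=
          Nat.lt_of_lt_of_le hD2 (Nat.pow_le_pow_right (by norm_num) hltD)
        have htb : (n ^^^ x).testBit M = false := Nat.testBit_lt_two_pow hDln
        rw [Nat.testBit_xor, hnk] at htb
        have hxk : x.testBit M = true := by
          cases hxb : x.testBit M
          · rw [hxb] at htb; simp at htb
          · rfl
        simp only [hnk, hxk, if_pos rfl]
        exact loop1_phase2 n x Dd (↑M) (by omega) hsub hD1 hD2 M hDln
    · -- k > M : bit k of N is clear, skip
      have hnlt : n < 2 ^ k :=
        Nat.lt_of_lt_of_le hM2 (Nat.pow_le_pow_right (by norm_num) hlt)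
      have hnk : n.testBit k = false := Nat.testBit_lt_two_pow hnlt
      simp only [hnk]
      simpa using ih hnlt


theorem loop2_none (n : Nat) : ∀ (fuel : Nat) (a b : Int), (b - a).toNat = fuel → 0 ≤ a →
    (∀ j : Nat, a ≤ ↑j → (↑j : Int) < b → n.testBit j = true) →
    solveLoop2 (↑n) (PySem.List.pyRange a b 1) = -1 := by
  intro fuel
  induction fuel with
  | zero =>
    intro a b hf _ _
    rw [PySem.List.pyRange_one_eq_nil (by omega)]
    rfl
  | succ f ih =>
    intro a b hf ha h
    rw [PySem.List.pyRange_one_cons (by omega)]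
    have haa : a = ((a.toNat : Nat) : Int) := by omega
    rw [haa]
    simp only [solveLoop2, Int.toNat_natCast, band_one_eq]
    rw [h a.toNat (by omega) (by omega)]
    simp only [if_pos rfl, if_neg (by norm_num : ¬ (1 : Int) = 0)]
    rw [show ((a.toNat : Nat) : Int) + 1 = a + 1 by omega]
    exact ih (a + 1) b (by omega) (by omega) (fun j h1 h2 => h j (by omega) h2)

theorem loop2_some (n s : Nat) : ∀ (fuel : Nat) (a b : Int), ((s : Int) - a).toNat = fuel →
    0 ≤ a → a ≤ ↑s → (↑s : Int) < b →
    (∀ j : Nat, a ≤ ↑j → j < s → n.testBit j = true) → n.testBit s = false →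
    solveLoop2 (↑n) (PySem.List.pyRange a b 1) = ↑s := by
  intro fuel
  induction fuel with
  | zero =>
    intro a b hf ha has hsb h hcl
    have : a = (s : Int) := by omega
    subst this
    rw [PySem.List.pyRange_one_cons (by omega)]
    simp only [solveLoop2, Int.toNat_natCast, band_one_eq]
    rw [hcl]
    simp
  | succ f ih =>
    intro a b hf ha has hsb h hcl
    have halt : a < (s : Int) := by omega
    rw [PySem.List.pyRange_one_cons (by omega)]
    have haa : a = ((a.toNat : Nat) : Int) := by omega
    rw [haa]
    simp only [solveLoop2, Int.toNat_natCast, band_one_eq]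
    rw [h a.toNat (by omega) (by omega)]
    simp only [if_pos rfl, if_neg (by norm_num : ¬ (1 : Int) = 0)]
    rw [show ((a.toNat : Nat) : Int) + 1 = a + 1 by omega]
    exact ih (a + 1) b (by omega) (by omega) (by omega) hsb
      (fun j h1 h2 => h j (by omega) h2) hcl

-- one step of the res-building loop, as plain arithmetic on Nat
theorem or_step_true (n k s : Nat) (hs : s < k) (hbit : n.testBit k = true) :
    (n / 2 ^ (k + 1) * 2 ^ (k + 1) + 2 ^ s) ||| 2 ^ k = n / 2 ^ k * 2 ^ k + 2 ^ s := by
  have hss : (2 : Nat) ^ s < 2 ^ k := Nat.pow_lt_pow_right (by norm_num) hs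
  have hsk : (2 : Nat) ^ s < 2 ^ (k + 1) := Nat.pow_lt_pow_right (by norm_num) (by omega)
  have hkk : (2 : Nat) ^ k + 2 ^ s < 2 ^ (k + 1) := by
    have : (2 : Nat) ^ (k + 1) = 2 * 2 ^ k := by ring
    omega
  have e1 : n / 2 ^ k = 2 * (n / 2 ^ (k + 1)) + 1 := by
    rw [Nat.testBit_eq_decide_div_mod_eq] at hbit
    have h2 : n / 2 ^ k / 2 = n / 2 ^ (k + 1) := by
      rw [Nat.div_div_eq_div_mul]; ring_nf
    have := Nat.div_add_mod (n / 2 ^ k) 2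
    simp at hbit
    omega
  calc n / 2 ^ (k + 1) * 2 ^ (k + 1) + 2 ^ s ||| 2 ^ k
      = (2 ^ (k + 1) * (n / 2 ^ (k + 1)) ||| 2 ^ s) ||| 2 ^ k := by
        rw [← Nat.two_pow_add_eq_or_of_lt hsk]; ring_nf
    _ = 2 ^ (k + 1) * (n / 2 ^ (k + 1)) ||| (2 ^ k ||| 2 ^ s) := by
        rw [Nat.or_assoc, Nat.or_comm (2 ^ s)]
    _ = 2 ^ (k + 1) * (n / 2 ^ (k + 1)) ||| (2 ^ k + 2 ^ s) := by
        rw [show (2 : Nat) ^ k + 2 ^ s = 2 ^ k * 1 + 2 ^ s by ring,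
          Nat.two_pow_add_eq_or_of_lt hss, Nat.mul_one]
    _ = 2 ^ (k + 1) * (n / 2 ^ (k + 1)) + (2 ^ k + 2 ^ s) :=
        (Nat.two_pow_add_eq_or_of_lt hkk _).symm
    _ = n / 2 ^ k * 2 ^ k + 2 ^ s := by
        have h2 : (2 : Nat) ^ (k + 1) = 2 * 2 ^ k := by ring
        calc 2 ^ (k + 1) * (n / 2 ^ (k + 1)) + (2 ^ k + 2 ^ s)
            = (2 * (n / 2 ^ (k + 1)) + 1) * 2 ^ k + 2 ^ s := by rw [h2]; ring
          _ = n / 2 ^ k * 2 ^ k + 2 ^ s := by rw [← e1]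

theorem div_step_false (n k : Nat) (hbit : n.testBit k = false) :
    n / 2 ^ (k + 1) * 2 ^ (k + 1) = n / 2 ^ k * 2 ^ k := by
  have e1 : n / 2 ^ k = 2 * (n / 2 ^ (k + 1)) := by
    rw [Nat.testBit_eq_decide_div_mod_eq] at hbit
    have h2 : n / 2 ^ k / 2 = n / 2 ^ (k + 1) := by
      rw [Nat.div_div_eq_div_mul]; ring_nf
    have := Nat.div_add_mod (n / 2 ^ k) 2
    simp at hbit
    omega
  have h2 : (2 : Nat) ^ (k + 1) = 2 * 2 ^ k := by ring
  rw [e1, h2]; ring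

theorem loop3_inv (n s : Nat) : ∀ t : Nat,
    solveLoop3 (↑n) (PySem.List.pyRange (↑(s + t)) (↑s) (-1))
      (↑(n / 2 ^ (s + t + 1) * 2 ^ (s + t + 1) + 2 ^ s)) =
      (↑(n / 2 ^ (s + 1) * 2 ^ (s + 1) + 2 ^ s) : Int) := by
  intro t
  induction t with
  | zero => rw [PySem.List.pyRange_neg_one_eq_nil (by omega)]; rfl
  | succ t ih =>
    rw [PySem.List.pyRange_neg_one_cons (by push_cast; omega)]
    simp only [solveLoop3, Int.toNat_natCast, band_one_eq]
    rw [show ((↑(s + (t + 1)) : Int) - 1) = (↑(s + t) : Int) by push_cast; ring]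
    cases hbit : n.testBit (s + (t + 1))
    · rw [show s + (t + 1) + 1 = s + t + 1 + 1 by ring] at *
      rw [show (n / 2 ^ (s + t + 1 + 1) * 2 ^ (s + t + 1 + 1) : Nat)
            = n / 2 ^ (s + t + 1) * 2 ^ (s + t + 1) from
          div_step_false n (s + t + 1) (by rw [show s + t + 1 = s + (t + 1) by ring]; exact hbit)]
      simpa using ih
    · simp only [Nat.shiftLeft_eq, one_mul, PySem.Int.bor_natCast]
      norm_num
      rw [or_step_true n (s + (t + 1)) s (by omega) hbit,
        show s + (t + 1) = s + t + 1 by ring]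
      exact ih

theorem loop4_false (x s : Nat) : ∀ (fuel : Nat) (a : Int), ((s : Int) - a).toNat = fuel → 0 ≤ a →
    (∀ j : Nat, a ≤ ↑j → j < s → x.testBit j = false) →
    solveLoop4 (↑x) (PySem.List.pyRange a (↑s) 1) = false := by
  intro fuel
  induction fuel with
  | zero =>
    intro a hf _ _
    rw [PySem.List.pyRange_one_eq_nil (by omega)]
    rfl
  | succ f ih =>
    intro a hf ha h
    rw [PySem.List.pyRange_one_cons (by omega)]
    have haa : a = ((a.toNat : Nat) : Int) := by omega
    rw [haa]
    simp only [solveLoop4, Int.toNat_natCast, band_one_eq]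
    rw [h a.toNat (by omega) (by omega)]
    norm_num
    exact ih (max a 0 + 1) (by omega) (by omega) (fun j h1 h2 => h j (by omega) h2)

theorem loop4_true (x s : Nat) (j : Nat) (hj : j < s) (hbit : x.testBit j = true) :
    ∀ (fuel : Nat) (a : Int), ((j : Int) - a).toNat = fuel → 0 ≤ a → a ≤ ↑j →
    solveLoop4 (↑x) (PySem.List.pyRange a (↑s) 1) = true := by
  intro fuel
  induction fuel with
  | zero =>
    intro a hf ha haj
    have : a = (j : Int) := by omega
    subst this
    rw [PySem.List.pyRange_one_cons (by omega)]
    simp only [solveLoop4, Int.toNat_natCast, band_one_eq]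
    rw [hbit]
    simp
  | succ f ih =>
    intro a hf ha haj
    have halt : a < (j : Int) := by omega
    rw [PySem.List.pyRange_one_cons (by omega)]
    have haa : a = ((a.toNat : Nat) : Int) := by omega
    rw [haa]
    simp only [solveLoop4, Int.toNat_natCast, band_one_eq]
    cases hb : x.testBit a.toNat
    · norm_num
      exact ih (max a 0 + 1) (by omega) (by omega) (by omega)
    · simp

-- bit_length characterization for a Nat value
theorem bl_char (m : Nat) (hm : m ≠ 0) :
    1 ≤ PySem.Int.bitLength (↑m) ∧ 2 ^ (PySem.Int.bitLength (↑m) - 1) ≤ m ∧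
      m < 2 ^ (PySem.Int.bitLength (↑m) - 1 + 1) := by
  have h1 := PySem.Int.lt_two_pow_bitLength (↑m : Int)
  have h2 := PySem.Int.two_pow_bitLength_le (↑m : Int) (by exact_mod_cast hm)
  rw [Int.natAbs_natCast] at h1 h2
  have hb : 1 ≤ PySem.Int.bitLength (↑m : Int) := by
    by_contra hc
    have : PySem.Int.bitLength (↑m : Int) = 0 := by omega
    rw [this] at h1
    simp at h1
    omega
  refine ⟨hb, h2, ?_⟩
  rwa [Nat.sub_add_cancel hb]

-- a number with t trailing ones then a zero bit, mod 2^(t+1)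
theorem trailing_ones_mod (q t : Nat) (h : ∀ j, j < t → q.testBit j = true)
    (ht : q.testBit t = false) : q % 2 ^ (t + 1) = 2 ^ t - 1 := by
  induction t generalizing q with
  | zero =>
    rw [Nat.testBit_eq_decide_div_mod_eq] at ht
    simp at ht
    have h1 : q % 2 ^ 1 = q % 2 := by norm_num
    have h2 : (2 : Nat) ^ 0 = 1 := by norm_num
    omega
  | succ t ih =>
    have hmm : q % 2 ^ (t + 1 + 1) = q % 2 + 2 * (q / 2 % 2 ^ (t + 1)) := by
      rw [show (2 : Nat) ^ (t + 1 + 1) = 2 * 2 ^ (t + 1) by ring, Nat.mod_mul]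
    have hq2 : q / 2 % 2 ^ (t + 1) = 2 ^ t - 1 :=
      ih (q / 2) (fun j hj => by rw [Nat.testBit_div_two]; exact h (j + 1) (by omega))
        (by rw [Nat.testBit_div_two]; exact ht)
    have hq0 : q % 2 = 1 := by
      have := h 0 (by omega)
      rw [Nat.testBit_eq_decide_div_mod_eq] at this
      simpa using this
    rw [hmm, hq0, hq2]
    have hpos : (1 : Nat) ≤ 2 ^ t := Nat.one_le_two_pow
    have : (2 : Nat) ^ (t + 1) = 2 * 2 ^ t := by ring
    omega

-- a number whose bits a..b are all ones, divided by 2^a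
theorem allones_div (n a b : Nat) (hab : a ≤ b + 1) (hb : n < 2 ^ (b + 1))
    (h : ∀ j, a ≤ j → j ≤ b → n.testBit j = true) :
    n / 2 ^ a = 2 ^ (b + 1 - a) - 1 := by
  set t := b + 1 - a with ht
  have hq1 : ∀ j, j < t → (n / 2 ^ a).testBit j = true := by
    intro j hj
    rw [Nat.testBit_div_two_pow]
    exact h (j + a) (by omega) (by omega)
  have hlt : n / 2 ^ a < 2 ^ t := by
    rw [Nat.div_lt_iff_lt_mul (Nat.two_pow_pos a)]
    calc n < 2 ^ (b + 1) := hb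
      _ = 2 ^ t * 2 ^ a := by rw [← Nat.pow_add]; congr 1; omega
  have hq2 : (n / 2 ^ a).testBit t = false := Nat.testBit_lt_two_pow hlt
  have hm := trailing_ones_mod (n / 2 ^ a) t hq1 hq2
  rw [Nat.mod_eq_of_lt
    (lt_of_lt_of_le hlt (Nat.pow_le_pow_right (by norm_num) (by omega)))] at hm
  exact hm

-- x % 2^s = 0 iff no set bit of x below s
theorem mod_pow_zero_iff (x s : Nat) :
    x % 2 ^ s = 0 ↔ ∀ j, j < s → x.testBit j = false := by
  constructor
  · intro h j hj
    have hmt := Nat.testBit_mod_two_pow x s j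
    rw [h, Nat.zero_testBit] at hmt
    cases hb : x.testBit j
    · rfl
    · rw [hb] at hmt
      simp [hj] at hmt
  · intro h
    by_contra hc
    obtain ⟨i, hi⟩ := Nat.exists_testBit_of_ne_zero hc
    rw [Nat.testBit_mod_two_pow] at hi
    simp only [Bool.and_eq_true, decide_eq_true_eq] at hi
    rw [h i hi.1] at hi
    simp at hi

-- the bits of R = (n / 2^(s+1)) * 2^(s+1) + 2^s
theorem tbR (n s j : Nat) :
    (n / 2 ^ (s + 1) * 2 ^ (s + 1) + 2 ^ s).testBit j =
      (if j < s then false else if j = s then true else n.testBit j) := by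
  set c := n / 2 ^ (s + 1) with hc
  rcases lt_trichotomy j s with hj | hj | hj
  · -- j < s : both terms divisible by 2^(j+1)
    have e1 : (2 : Nat) ^ (s + 1) = 2 ^ j * (2 * 2 ^ (s - j)) := by
      rw [← Nat.pow_succ']
      rw [← Nat.pow_add]
      congr 1
      omega
    have e2 : (2 : Nat) ^ s = 2 ^ j * (2 * 2 ^ (s - j - 1)) := by
      rw [← Nat.pow_succ']
      rw [← Nat.pow_add]
      congr 1
      omega
    have : c * 2 ^ (s + 1) + 2 ^ s = 2 ^ j * (2 * (c * 2 ^ (s - j) + 2 ^ (s - j - 1))) := by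
      rw [e1, e2]; ring
    rw [Nat.testBit_eq_decide_div_mod_eq, this,
      Nat.mul_div_cancel_left _ (Nat.two_pow_pos j)]
    simp [hj, Nat.mul_mod_right]
  · -- j = s
    subst hj
    have e1 : (2 : Nat) ^ (j + 1) = 2 ^ j * 2 := by ring
    have : c * 2 ^ (j + 1) + 2 ^ j = 2 ^ j * (2 * c + 1) := by rw [e1]; ring
    rw [Nat.testBit_eq_decide_div_mod_eq, this,
      Nat.mul_div_cancel_left _ (Nat.two_pow_pos j)]
    simp [Nat.mul_add_mod]
  · -- j > s : quotient by 2^j ignores the low part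
    have e0 : c * 2 ^ (s + 1) + 2 ^ s = 2 ^ s + c * 2 ^ (s + 1) := by ring
    have e1 : (c * 2 ^ (s + 1) + 2 ^ s) / 2 ^ (s + 1) = c := by
      rw [e0, show c * 2 ^ (s + 1) = 2 ^ (s + 1) * c by ring,
        Nat.add_mul_div_left _ _ (Nat.two_pow_pos (s + 1)),
        Nat.div_eq_of_lt (Nat.pow_lt_pow_right (by norm_num) (by omega))]
      omega
    have hsplit : (2 : Nat) ^ j = 2 ^ (s + 1) * 2 ^ (j - s - 1) := by
      rw [← Nat.pow_add]
      congr 1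
      omega
    have e2 : (c * 2 ^ (s + 1) + 2 ^ s) / 2 ^ j = n / 2 ^ j := by
      conv_lhs => rw [hsplit, ← Nat.div_div_eq_div_mul, e1]
      conv_rhs => rw [hsplit, ← Nat.div_div_eq_div_mul]
    rw [Nat.testBit_eq_decide_div_mod_eq, e2, ← Nat.testBit_eq_decide_div_mod_eq]
    simp [show ¬ j < s by omega, show j ≠ s by omega]

-- 2^k &&& x = 0 when x < 2^k
theorem and_high_zero (x k : Nat) (h : x < 2 ^ k) : 2 ^ k &&& x = 0 := by
  apply Nat.eq_of_testBit_eq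
  intro j
  rw [Nat.testBit_land, Nat.zero_testBit, Nat.testBit_two_pow]
  rcases eq_or_ne k j with rfl | hne
  · rw [Nat.testBit_lt_two_pow h]
    simp
  · simp [hne]

-- final subsumption test: R & x = x iff x has no set bit below s
theorem final_iff (n x s : Nat) (hxs : x.testBit s = false)
    (hxh : ∀ j, s < j → x.testBit j = n.testBit j) :
    (n / 2 ^ (s + 1) * 2 ^ (s + 1) + 2 ^ s) &&& x = x ↔ x % 2 ^ s = 0 := by
  constructor
  · intro h
    rw [mod_pow_zero_iff]
    intro j hj
    have hb := congrArg (fun y => y.testBit j) h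
    simp only [Nat.testBit_land, tbR] at hb
    rw [if_pos hj] at hb
    simpa using hb.symm
  · intro h
    apply Nat.eq_of_testBit_eq
    intro j
    rw [Nat.testBit_land, tbR]
    rcases lt_trichotomy j s with hj | hj | hj
    · rw [if_pos hj, (mod_pow_zero_iff x s).mp h j hj]
      simp
    · subst hj
      rw [if_neg (by omega), if_pos rfl, hxs]
      simp
    · rw [if_neg (by omega), if_neg (by omega), ← hxh j hj, Bool.and_self]

-- main equivalence on Nat inputs
theorem main_nat (n x : Nat) (hn : n < 2 ^ 60) (hx : x < 2 ^ 60) :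
    solve (↑n) (↑x) = solve_alt (↑n) (↑x) := by
  by_cases hsub : n &&& x = x
  case neg =>
    have hband : PySem.Int.band ↑n ↑x ≠ (↑x : Int) := by
      rw [PySem.Int.band_natCast]
      exact_mod_cast hsub
    simp only [solve, solve_alt, if_pos hband]
  case pos =>
    have hband : PySem.Int.band ↑n ↑x = (↑x : Int) := by
      rw [PySem.Int.band_natCast]
      exact_mod_cast hsub
    have hnot : ¬ (PySem.Int.band ↑n ↑x ≠ (↑x : Int)) := not_not_intro hband
    have hbsub : ∀ j, x.testBit j = true → n.testBit j = true := by
      intro j hj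
      have hcb := congrArg (fun y => y.testBit j) hsub
      simp only [Nat.testBit_land] at hcb
      cases hb : n.testBit j
      · rw [hb, hj] at hcb
        simpa using hcb
      · rfl
    by_cases hnx : n = x
    case pos =>
      subst hnx
      have h2 := loop1_refl (↑n) (PySem.List.pyRange 59 (-1) (-1)) (-1)
      simp [solve, solve_alt, if_neg hnot, h2]
    case neg =>
      have hncx : ¬ ((↑n : Int) = ↑x) := by exact_mod_cast hnx
      have hn0 : n ≠ 0 := by
        intro h0
        subst h0
        rw [Nat.zero_and] at hsub
        exact hnx hsub
      have hD0 : n ^^^ x ≠ 0 := fun h => hnx (by simpa using Nat.xor_eq_zero_iff.mp h)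
      obtain ⟨hblM, hM1, hM2⟩ := bl_char n hn0
      obtain ⟨hblD, hD1, hD2⟩ := bl_char (n ^^^ x) hD0
      set M := PySem.Int.bitLength (↑n : Int) - 1 with hMdef
      set Dd := PySem.Int.bitLength (↑(n ^^^ x) : Int) - 1 with hDdef
      have hxle : x ≤ n := by
        conv_lhs => rw [← hsub]
        exact Nat.and_le_left
      have hDn : n ^^^ x < 2 ^ (M + 1) := Nat.xor_lt_two_pow hM2 (lt_of_le_of_lt hxle hM2)
      have hDM : Dd ≤ M := by
        by_contra hc
        have := Nat.pow_le_pow_right (show 1 ≤ 2 by norm_num) (show M + 1 ≤ Dd by omega)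
        omega
      have hL1 : solveLoop1 ↑n ↑x (PySem.List.pyRange 59 (-1) (-1)) (-1) (-1) = (↑M, ↑Dd) := by
        have h60 := loop1_phase1 n x M Dd hbsub hM1 hM2 hD1 hD2 hDM 60 hn
        norm_num at h60
        exact h60
      have hxbit_high : ∀ j, Dd < j → x.testBit j = n.testBit j := by
        intro j hj
        have hdb : (n ^^^ x).testBit j = false :=
          Nat.testBit_lt_two_pow
            (lt_of_lt_of_le hD2 (Nat.pow_le_pow_right (by norm_num) (by omega)))
        rw [Nat.testBit_xor] at hdb
        cases hb1 : n.testBit j <;> cases hb2 : x.testBit j <;> simp_all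
      have hbl : PySem.Int.bitLength (↑(n ^^^ x) : Int) = Dd + 1 := by omega
      have hd : ((PySem.Int.bitLength (PySem.Int.bxor ↑n ↑x) : Int) - 1) = ((Dd : Nat) : Int) := by
        rw [show PySem.Int.bxor (↑n) (↑x) = ((n ^^^ x : Nat) : Int) from PySem.Int.bxor_natCast n x,
          hbl]
        push_cast
        ring
      -- value of B's res as a Nat
      have hres : (((↑n : Int) >>> Dd) + 1) <<< Dd = (((n / 2 ^ Dd + 1) * 2 ^ Dd : Nat) : Int) := by
        rw [show ((↑n : Int) >>> Dd) = ((n >>> Dd : Nat) : Int) from rfl,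
          show ((n >>> Dd : Nat) : Int) + 1 = ((n >>> Dd + 1 : Nat) : Int) by push_cast; ring,
          show (((n >>> Dd + 1 : Nat) : Int)) <<< Dd = ((((n >>> Dd + 1) <<< Dd : Nat)) : Int) from rfl,
          Nat.shiftRight_eq_div_pow, Nat.shiftLeft_eq]
      by_cases hexq : ∃ j, Dd ≤ j ∧ j < M ∧ n.testBit j = false
      case neg =>
        -- no clear bit between Dd and M: the carry overflows to 2^(M+1)
        have hall : ∀ j, Dd ≤ j → j ≤ M → n.testBit j = true := by
          intro j h1 h2
          rcases Nat.eq_or_lt_of_le h2 with rfl | hlt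
          · exact Nat.testBit_of_two_pow_le_and_two_pow_add_one_gt hM1 hM2
          · cases hb : n.testBit j
            · exact absurd (⟨h1, hlt, hb⟩ : Dd ≤ j ∧ j < M ∧ n.testBit j = false)
                (not_exists.mp hexq j)
            · rfl
        have hL2 : solveLoop2 ↑n (PySem.List.pyRange ↑Dd ↑M 1) = -1 :=
          loop2_none n ((↑M - (↑Dd : Int)).toNat) ↑Dd ↑M rfl (by omega)
            (fun j h1 h2 => hall j (by exact_mod_cast h1) (by omega))
        have hdiv : n / 2 ^ Dd = 2 ^ (M + 1 - Dd) - 1 := allones_div n Dd M (by omega) hM2 hall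
        have hres2 : (n / 2 ^ Dd + 1) * 2 ^ Dd = 2 ^ (M + 1) := by
          rw [hdiv]
          have h1 : (1 : Nat) ≤ 2 ^ (M + 1 - Dd) := Nat.one_le_two_pow
          rw [show (2 ^ (M + 1 - Dd) - 1 + 1) = 2 ^ (M + 1 - Dd) by omega, ← Nat.pow_add]
          congr 1
          omega
        have hand : (2 : Nat) ^ (M + 1) &&& x = 0 :=
          and_high_zero x (M + 1) (lt_of_le_of_lt hxle hM2)
        have hDdne : ¬ (((Dd : Nat) : Int) = -1) := by omega
        simp only [solve, solve_alt, if_neg hnot, if_neg hncx, hL1, hd, Int.toNat_natCast,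
          hres, hres2, hL2, if_true, if_neg hDdne]
        rw [show PySem.Int.band ((2 ^ (M + 1) : Nat) : Int) ↑x = (((2 ^ (M + 1) &&& x : Nat)) : Int)
          from PySem.Int.band_natCast _ _, hand]
        have htn : ((↑M : Int) + 1).toNat = M + 1 := by omega
        rcases eq_or_ne x 0 with rfl | hx0
        · norm_num [htn, Nat.shiftLeft_eq]
        · have hcx0' : ¬ ((0 : Int) = ↑x) := by exact_mod_cast Ne.symm hx0
          norm_num [htn, hx0, hcx0']
      case pos =>
        obtain ⟨hsDd, hsM, hsbit⟩ := Nat.find_spec hexq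
        set s := Nat.find hexq with hsdef
        have hsmin : ∀ j, Dd ≤ j → j < s → n.testBit j = true := by
          intro j h1 h2
          cases hb : n.testBit j
          · exact absurd ⟨h1, by omega, hb⟩ (Nat.find_min hexq h2)
          · rfl
        have htbD : (n ^^^ x).testBit Dd = true :=
          Nat.testBit_of_two_pow_le_and_two_pow_add_one_gt hD1 hD2
        have hnDd : n.testBit Dd = true := by
          rw [Nat.testBit_xor] at htbD
          cases hb : n.testBit Dd
          · have hxb : x.testBit Dd = true := by
              cases hxb : x.testBit Dd
              · rw [hb, hxb] at htbD; simp at htbD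
              · rfl
            have := hbsub Dd hxb
            simp [this] at hb
          · rfl
        have hsDd' : Dd < s := by
          rcases Nat.eq_or_lt_of_le hsDd with heq | h
          · rw [← heq, hnDd] at hsbit
            simp at hsbit
          · exact h
        have hL2 : solveLoop2 ↑n (PySem.List.pyRange ↑Dd ↑M 1) = ↑s :=
          loop2_some n s (((s : Int) - (↑Dd : Int)).toNat) ↑Dd ↑M rfl (by omega)
            (by exact_mod_cast hsDd) (by exact_mod_cast hsM)
            (fun j h1 h2 => hsmin j (by exact_mod_cast h1) h2) hsbit
        have hdiv0 : n / 2 ^ (M + 1) = 0 := Nat.div_eq_of_lt hM2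
        have hL3 : solveLoop3 ↑n (PySem.List.pyRange (↑M) (↑s) (-1)) (↑(2 ^ s : Nat)) =
            (↑(n / 2 ^ (s + 1) * 2 ^ (s + 1) + 2 ^ s : Nat) : Int) := by
          have h3 := loop3_inv n s (M - s)
          rw [show s + (M - s) = M by omega, hdiv0] at h3
          simpa using h3
        have hxs : x.testBit s = false := by
          rw [hxbit_high s hsDd']
          exact hsbit
        have hxhigh : ∀ j, s < j → x.testBit j = n.testBit j := fun j hj => hxbit_high j (by omega)
        -- the +1 carry lands on bit s and clears everything below (B's res = A's res)
        have hq := trailing_ones_mod (n / 2 ^ Dd) (s - Dd)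
          (fun j hj => by
            rw [Nat.testBit_div_two_pow]
            exact hsmin (j + Dd) (by omega) (by omega))
          (by
            rw [Nat.testBit_div_two_pow, show s - Dd + Dd = s by omega]
            exact hsbit)
        have hBres : (n / 2 ^ Dd + 1) * 2 ^ Dd = n / 2 ^ (s + 1) * 2 ^ (s + 1) + 2 ^ s := by
          have hdm := Nat.div_add_mod (n / 2 ^ Dd) (2 ^ (s - Dd + 1))
          have h1 : (1 : Nat) ≤ 2 ^ (s - Dd) := Nat.one_le_two_pow
          have h2 : (2 : Nat) ^ (s - Dd + 1) = 2 * 2 ^ (s - Dd) := by ring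
          have hcm : n / 2 ^ Dd / 2 ^ (s - Dd + 1) * 2 ^ (s - Dd + 1)
              = 2 ^ (s - Dd + 1) * (n / 2 ^ Dd / 2 ^ (s - Dd + 1)) := Nat.mul_comm _ _
          have hq1 : n / 2 ^ Dd + 1
              = n / 2 ^ Dd / 2 ^ (s - Dd + 1) * 2 ^ (s - Dd + 1) + 2 ^ (s - Dd) := by omega
          rw [hq1, Nat.div_div_eq_div_mul, ← Nat.pow_add,
            show Dd + (s - Dd + 1) = s + 1 by omega, Nat.add_mul, Nat.mul_assoc,
            ← Nat.pow_add, ← Nat.pow_add, show s - Dd + 1 + Dd = s + 1 by omega,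
            show s - Dd + Dd = s by omega]
        have hDdne : ¬ (((Dd : Nat) : Int) = -1) := by omega
        have hsne : ¬ (((s : Nat) : Int) = -1) := by omega
        by_cases hx0 : x % 2 ^ s = 0
        case pos =>
          have hL4 : solveLoop4 ↑x (PySem.List.pyRange 0 (↑s) 1) = false :=
            loop4_false x s s 0 (by omega) (by omega)
              (fun j h1 h2 => (mod_pow_zero_iff x s).mp hx0 j h2)
          have hband2 : (n / 2 ^ (s + 1) * 2 ^ (s + 1) + 2 ^ s) &&& x = x :=
            (final_iff n x s hxs hxhigh).mpr hx0
          simp only [solve, solve_alt, if_neg hnot, if_neg hncx, hL1, hd, Int.toNat_natCast,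
            hres, hBres, hL2, if_neg hDdne, if_neg hsne, hL4, Nat.shiftLeft_eq, one_mul, hL3]
          rw [show PySem.Int.band ((n / 2 ^ (s + 1) * 2 ^ (s + 1) + 2 ^ s : Nat) : Int) ↑x
              = (((n / 2 ^ (s + 1) * 2 ^ (s + 1) + 2 ^ s) &&& x : Nat) : Int)
            from PySem.Int.band_natCast _ _, hband2]
          simp
        case neg =>
          have hex4 : ∃ j, j < s ∧ x.testBit j = true := by
            by_contra hc
            refine hx0 ((mod_pow_zero_iff x s).mpr (fun j hj => ?_))
            cases hb : x.testBit j
            · rfl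
            · exact absurd ⟨j, hj, hb⟩ hc
          obtain ⟨j, hj1, hj2⟩ := hex4
          have hL4 : solveLoop4 ↑x (PySem.List.pyRange 0 (↑s) 1) = true :=
            loop4_true x s j hj1 hj2 j 0 (by omega) (by omega) (by omega)
          have hbandne : (n / 2 ^ (s + 1) * 2 ^ (s + 1) + 2 ^ s) &&& x ≠ x :=
            fun h => hx0 ((final_iff n x s hxs hxhigh).mp h)
          simp only [solve, solve_alt, if_neg hnot, if_neg hncx, hL1, hd, Int.toNat_natCast,
            hres, hBres, hL2, if_neg hDdne, if_neg hsne, hL4, Nat.shiftLeft_eq, one_mul, hL3]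
          rw [show PySem.Int.band ((n / 2 ^ (s + 1) * 2 ^ (s + 1) + 2 ^ s : Nat) : Int) ↑x
              = (((n / 2 ^ (s + 1) * 2 ^ (s + 1) + 2 ^ s) &&& x : Nat) : Int)
            from PySem.Int.band_natCast _ _,
            if_neg (show ¬ (((n / 2 ^ (s + 1) * 2 ^ (s + 1) + 2 ^ s) &&& x : Nat) : Int) = ↑x
              by exact_mod_cast hbandne)]
          simp

-- a nonnegative N with negative X: both sides fail the subset check at once
theorem main_negx (N X : Int) (hN : 0 ≤ N) (hX : X < 0) : solve N X = solve_alt N X := by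
  have h0 : (0 : Int) ≤ PySem.Int.band N X := PySem.Int.band_nonneg_of_nonneg_left X hN
  have hne : PySem.Int.band N X ≠ X := by omega
  simp [solve, solve_alt, hne]

-- the subset check fails: both sides return -1 immediately
theorem main_bandne (N X : Int) (hne : PySem.Int.band N X ≠ X) : solve N X = solve_alt N X := by
  simp [solve, solve_alt, hne]

-- N == X: A's first loop never breaks, both sides return N
theorem main_eq (N : Int) : solve N N = solve_alt N N := by
  have h2 := loop1_refl N (PySem.List.pyRange 59 (-1) (-1)) (-1)
  have hb : PySem.Int.band N N = N := PySem.Int.band_self N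
  have hnot : ¬ PySem.Int.band N N ≠ N := not_not_intro hb
  simp [solve, solve_alt, hnot, h2]

theorem pre_to_nat (N X : Int) (hd : Dom_solve N X) (hN : 0 ≤ N) (hX : 0 ≤ X) :
    ∃ n x : Nat, N = ↑n ∧ X = ↑x ∧ n < 2 ^ 60 ∧ x < 2 ^ 60 := by
  refine ⟨N.toNat, X.toNat, (Int.toNat_of_nonneg hN).symm, (Int.toNat_of_nonneg hX).symm, ?_, ?_⟩ <;>
  · unfold Dom_solve pvDomInt at hd
    simp only [Bool.and_eq_true, decide_eq_true_eq] at hd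
    omega

-- ===== VERDICT (by name: the statement is the Claim_ definition above) =====
theorem solve_spec : Claim_equal_solve := by
  intro N X hd hp
  rcases hp with hN | hne | rfl
  · rcases lt_or_ge X 0 with hX | hX
    · exact main_negx N X hN hX
    · obtain ⟨n, x, rfl, rfl, hn, hx⟩ := pre_to_nat N X hd hN hX
      exact main_nat n x hn hx
  · exact main_bandne N X hne
  · exact main_eq N
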